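-- pv_equiv track=rewrite | github.com/cmgoffena13/codebase-parser | src/mcp/clip.py | clipped_doc_lines
-- ===== SOURCE A (Python) =====
-- MAX_TOOL_OUTPUT = 100_000
--
-- def clip(text: str, limit: int = MAX_TOOL_OUTPUT) -> str:
--     text = str(text)
--     if len(text) <= limit:
--         return text
--     return text[:limit] + f"\n...[truncated {len(text) - limit} chars]"
--
-- def clipped_doc_lines(detail_prefix: str, doc_raw: str, limit: int) -> list[str]:
--     """
--     Normalize docstring to a single line for display, ``clip`` to ``limit``, and
--     return tree lines (``Doc:`` plus optional continuation lines after ``clip``'s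
--     newline).
--     """
--     t = doc_raw.replace("\n", " ").strip()
--     if not t:
--         return []
--     c = clip(t, limit)
--     if "\n" not in c:
--         escaped = c.replace("\\", "\\\\").replace('"', '\\"')
--         return [f'{detail_prefix}Doc: "{escaped}"']
--     body, tail = c.split("\n", 1)
--     escaped = body.replace("\\", "\\\\").replace('"', '\\"')
--     lines = [f'{detail_prefix}Doc: "{escaped}"']
--     lines.extend(f"{detail_prefix}    {ln}" for ln in tail.splitlines())
--     return lines
-- ===== SOURCE B (Python) =====
-- def clipped_doc_lines(detail_prefix: str, doc_raw: str, limit: int) -> list[str]: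
--     """Single direct length branch: no clip() helper, no newline split/splitlines."""
--     t = doc_raw.replace("\n", " ").strip()
--     if not t:
--         return []
--
--     def esc(s: str) -> str:
--         return s.replace("\\", "\\\\").replace('"', '\\"')
--
--     if len(t) <= limit:
--         return [f'{detail_prefix}Doc: "{esc(t)}"']
--     return [
--         f'{detail_prefix}Doc: "{esc(t[:limit])}"',
--         f'{detail_prefix}    ...[truncated {len(t) - limit} chars]',
--     ]
-- ===== Notes on version B (the rewrite author's own statement) =====
-- stated objective: simpler
-- what changed: B drops the generic clip() helper and the subsequent newline search/split/splitlines re-parse, branching once on len(t) <= limit and emitting the Doc line plus, when truncating, the single literal continuation line directly.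
import Mathlib
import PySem

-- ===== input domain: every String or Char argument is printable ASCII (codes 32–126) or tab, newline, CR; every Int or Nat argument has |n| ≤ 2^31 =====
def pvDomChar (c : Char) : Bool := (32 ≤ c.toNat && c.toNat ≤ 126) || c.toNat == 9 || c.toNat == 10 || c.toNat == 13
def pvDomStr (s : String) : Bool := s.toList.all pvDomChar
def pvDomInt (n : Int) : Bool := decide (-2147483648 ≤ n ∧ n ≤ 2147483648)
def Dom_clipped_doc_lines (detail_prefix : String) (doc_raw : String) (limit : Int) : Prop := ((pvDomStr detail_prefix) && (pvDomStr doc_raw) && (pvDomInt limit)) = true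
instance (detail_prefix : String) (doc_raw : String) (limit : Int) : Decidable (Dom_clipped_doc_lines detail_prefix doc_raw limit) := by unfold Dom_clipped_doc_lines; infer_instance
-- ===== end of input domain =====

-- B inlines the clip()-then-reparse decomposition into one direct length branch
-- (no helper call, no newline search/split/splitlines); objective: simpler, same cost.

-- ===== PORT A =====
-- helper clip(text, limit) of the Python module
def pvClip (text : List Char) (limit : Int) : List Char :=
  if (text.length : Int) ≤ limit then text
  else PySem.Chars.slice text none (some limit) ++
    ('\n' :: ("...[truncated ".toList ++ PySem.Int.toChars ((text.length : Int) - limit) ++ " chars]".toList))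

def clipped_doc_lines (detail_prefix : String) (doc_raw : String) (limit : Int) : List String :=
  let t := PySem.Chars.strip (PySem.Chars.replace doc_raw.toList ['\n'] [' '])
  if t = [] then []
  else
    let c := pvClip t limit
    if PySem.Chars.isIn ['\n'] c = false then
      let escaped := PySem.Chars.replace (PySem.Chars.replace c ['\\'] ['\\', '\\']) ['"'] ['\\', '"']
      [String.ofList (detail_prefix.toList ++ "Doc: \"".toList ++ escaped ++ ['"'])]
    else
      -- body, tail = c.split("\n", 1)  (the branch guarantees two pieces; the
      -- wildcard arm is unreachable there)
      match PySem.Chars.splitMax? c ['\n'] 1 with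
      | some (body :: tail :: _) =>
        let escaped := PySem.Chars.replace (PySem.Chars.replace body ['\\'] ['\\', '\\']) ['"'] ['\\', '"']
        String.ofList (detail_prefix.toList ++ "Doc: \"".toList ++ escaped ++ ['"']) ::
          (PySem.Chars.splitlines tail).map
            (fun ln => String.ofList (detail_prefix.toList ++ "    ".toList ++ ln))
      | _ => []

-- ===== PORT B =====
-- helper esc(s) of Source B
def pvEscape (s : List Char) : List Char :=
  PySem.Chars.replace (PySem.Chars.replace s ['\\'] ['\\', '\\']) ['"'] ['\\', '"']

def clipped_doc_lines_alt (detail_prefix : String) (doc_raw : String) (limit : Int) : List String :=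
  let t := PySem.Chars.strip (PySem.Chars.replace doc_raw.toList ['\n'] [' '])
  if t = [] then []
  else if (t.length : Int) ≤ limit then
    [String.ofList (detail_prefix.toList ++ "Doc: \"".toList ++ pvEscape t ++ ['"'])]
  else
    [String.ofList (detail_prefix.toList ++ "Doc: \"".toList ++
        pvEscape (PySem.Chars.slice t none (some limit)) ++ ['"']),
     String.ofList (detail_prefix.toList ++ "    ...[truncated ".toList ++
        PySem.Int.toChars ((t.length : Int) - limit) ++ " chars]".toList)]

-- ===== PRECONDITION & SPEC =====
def Spec_clipped_doc_lines (detail_prefix : String) (doc_raw : String) (limit : Int) (out : List String) : Prop := out = clipped_doc_lines_alt detail_prefix doc_raw limit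
instance (detail_prefix : String) (doc_raw : String) (limit : Int) (out : List String) : Decidable (Spec_clipped_doc_lines detail_prefix doc_raw limit out) := by unfold Spec_clipped_doc_lines; infer_instance

-- ===== CLAIM (what is proved, stated in full; the proofs are below) =====
def Claim_equal_clipped_doc_lines : Prop := ∀ (detail_prefix : String) (doc_raw : String) (limit : Int), Dom_clipped_doc_lines detail_prefix doc_raw limit → Spec_clipped_doc_lines detail_prefix doc_raw limit (clipped_doc_lines detail_prefix doc_raw limit)

-- ===== LEMMAS AND PROOFS =====

-- replacing one character by one character is a map
theorem pv_replace_go_single (a b : Char) :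
    ∀ (l : List Char) (fuel : Nat) (acc : List Char), l.length ≤ fuel →
      PySem.Chars.replace.go [a] [b] fuel l acc
        = acc.reverse ++ l.map (fun c => if c = a then b else c) := by
  intro l
  induction l with
  | nil =>
    intro fuel acc _
    cases fuel <;> simp [PySem.Chars.replace.go]
  | cons c t ih =>
    intro fuel acc h
    cases fuel with
    | zero => simp at h
    | succ f =>
      simp only [PySem.Chars.replace.go]
      by_cases hc : a = c
      · subst hc
        simp [List.isPrefixOf, ih f _ (by simpa using h)]
      · simp [List.isPrefixOf, hc, Ne.symm hc, ih f _ (by simpa using h)]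

theorem pv_replace_single (a b : Char) (s : List Char) :
    PySem.Chars.replace s [a] [b] = s.map (fun c => if c = a then b else c) := by
  simp [PySem.Chars.replace, pv_replace_go_single a b s s.length [] le_rfl]

theorem pv_strip_sublist (s : List Char) : List.Sublist (PySem.Chars.strip s) s := by
  unfold PySem.Chars.strip PySem.Chars.rstrip PySem.Chars.lstrip
  refine List.Sublist.trans ?_ (List.dropWhile_sublist (l := s) (p := PySem.Chars.isspace))
  have h1 := (List.dropWhile_sublist (l := (List.dropWhile PySem.Chars.isspace s).reverse)
      (p := PySem.Chars.isspace)).reverse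
  simpa using h1

-- t = doc_raw.replace("\n", " ").strip() contains no newline
theorem pv_newline_not_mem (doc : List Char) :
    '\n' ∉ PySem.Chars.strip (PySem.Chars.replace doc ['\n'] [' ']) := by
  intro h
  have h2 := (pv_strip_sublist _).mem h
  rw [pv_replace_single] at h2
  simp only [List.mem_map] at h2
  obtain ⟨c, _, hc⟩ := h2
  by_cases h3 : c = '\n' <;> simp [h3] at hc

-- s[:limit] is a take, hence its characters are characters of s
theorem pv_slice_to_eq_take (t : List Char) (limit : Int) :
    PySem.Chars.slice t none (some limit) = t.take (PySem.List.clampIdx t.length limit) := by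
  simp [PySem.Chars.slice, PySem.List.slice]

-- split(sep, maxsplit) machinery: once maxsplit is exhausted the rest is one piece
theorem pv_splitOnMax_go_zero (fuel : Nat) (l cur : List Char) (accs : List (List Char)) :
    PySem.Chars.splitOnMax.go ['\n'] fuel 0 l cur accs = accs.reverse ++ [cur.reverse ++ l] := by
  cases fuel with
  | zero => simp [PySem.Chars.splitOnMax.go]
  | succ f => cases l <;> simp [PySem.Chars.splitOnMax.go]

-- c.split("\n", 1) on pre ++ "\n" ++ rest with no newline in pre is [pre, rest]
theorem pv_splitOnMax_go_split (rest : List Char) :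
    ∀ (pre : List Char) (fuel : Nat) (cur : List Char) (accs : List (List Char)),
      '\n' ∉ pre → pre.length < fuel →
      PySem.Chars.splitOnMax.go ['\n'] fuel 1 (pre ++ '\n' :: rest) cur accs
        = accs.reverse ++ [cur.reverse ++ pre, rest] := by
  intro pre
  induction pre with
  | nil =>
    intro fuel cur accs _ hf
    cases fuel with
    | zero => omega
    | succ f =>
      simp [PySem.Chars.splitOnMax.go, List.isPrefixOf, pv_splitOnMax_go_zero f rest [] _]
  | cons c t ih =>
    intro fuel cur accs hmem hf
    cases fuel with
    | zero => simp at hf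
    | succ f =>
      have hc : ¬ ('\n' = c) := fun h => hmem (by simp [← h])
      simp only [PySem.Chars.splitOnMax.go, List.cons_append]
      simp [List.isPrefixOf, hc,
        ih f (c :: cur) accs (fun h => hmem (List.mem_cons_of_mem _ h)) (by simpa using hf)]

-- splitlines of a non-empty line without line-break characters is that single line
theorem pv_splitlines_go_step (isB : Char → Bool) (c : Char) (t cur : List Char)
    (acc : List (List Char)) (h1 : isB c = false) (h2 : c ≠ '\x0d') :
    PySem.Chars.splitlines.go isB (c :: t) cur acc
      = PySem.Chars.splitlines.go isB t (c :: cur) acc := by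
  cases t with
  | nil => simp [PySem.Chars.splitlines.go, h1]
  | cons d u =>
    by_cases hd : d = '\x0d'
    · subst hd; simp [PySem.Chars.splitlines.go, h1, h2]
    · simp [PySem.Chars.splitlines.go, h1, h2, hd]

theorem pv_splitlines_go_nobreak (isB : Char → Bool) :
    ∀ (l cur : List Char) (acc : List (List Char)),
      (∀ c ∈ l, isB c = false ∧ c ≠ '\x0d') →
      PySem.Chars.splitlines.go isB l cur acc
        = if cur = [] ∧ l = [] then acc.reverse else acc.reverse ++ [cur.reverse ++ l] := by
  intro l
  induction l with
  | nil =>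
    intro cur acc _
    by_cases hc : cur = [] <;> simp [PySem.Chars.splitlines.go, hc]
  | cons c t ih =>
    intro cur acc h
    have hc := h c (by simp)
    rw [pv_splitlines_go_step isB c t cur acc hc.1 hc.2,
      ih (c :: cur) acc (fun x hx => h x (by simp [hx]))]
    simp

theorem pv_splitlines_printable (l : List Char) (hne : l ≠ [])
    (h : ∀ c ∈ l, 32 ≤ c.toNat ∧ c.toNat ≤ 126) :
    PySem.Chars.splitlines l = [l] := by
  unfold PySem.Chars.splitlines
  rw [pv_splitlines_go_nobreak _ l [] []]
  · simp [hne]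
  · intro c hc
    have hb := h c hc
    refine ⟨?_, ?_⟩
    · simp only [Bool.or_eq_false_iff, decide_eq_false_iff_not]
      omega
    · intro h13
      subst h13
      simp at hb

-- the characters of str(n) are printable ASCII
theorem pv_toDigitsCore_mem (fuel : Nat) :
    ∀ (n : Nat) (acc : List Char),
      (∀ c ∈ acc, 48 ≤ c.toNat ∧ c.toNat ≤ 57) →
      ∀ c ∈ Nat.toDigitsCore 10 fuel n acc, 48 ≤ c.toNat ∧ c.toNat ≤ 57 := by
  induction fuel with
  | zero => intro n acc h; simpa [Nat.toDigitsCore] using h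
  | succ f ih =>
    intro n acc h
    have hd : 48 ≤ (Nat.digitChar (n % 10)).toNat ∧ (Nat.digitChar (n % 10)).toNat ≤ 57 := by
      have : n % 10 < 10 := Nat.mod_lt _ (by norm_num)
      interval_cases h : n % 10 <;> simp [Nat.digitChar]
    simp only [Nat.toDigitsCore]
    split
    · intro c hc
      rcases List.mem_cons.mp hc with h1 | h1
      · subst h1; exact hd
      · exact h c h1
    · refine ih (n / 10) _ ?_
      intro c hc
      rcases List.mem_cons.mp hc with h1 | h1
      · subst h1; exact hd
      · exact h c h1

theorem pv_toChars_printable (n : Int) :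
    ∀ c ∈ PySem.Int.toChars n, 32 ≤ c.toNat ∧ c.toNat ≤ 126 := by
  intro c hc
  unfold PySem.Int.toChars at hc
  have hdig : ∀ (m : Nat), c ∈ Nat.toDigits 10 m → 32 ≤ c.toNat ∧ c.toNat ≤ 126 := by
    intro m hm
    have := pv_toDigitsCore_mem (m + 1) m [] (by simp) c hm
    omega
  split at hc
  · rcases List.mem_cons.mp hc with h1 | h1
    · subst h1; simp
    · exact hdig _ h1
  · exact hdig _ hc

-- the tail clip() appends contains no line-break character
theorem pv_tail_printable (d : Int) :
    ∀ c ∈ "...[truncated ".toList ++ PySem.Int.toChars d ++ " chars]".toList,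
      32 ≤ c.toNat ∧ c.toNat ≤ 126 := by
  intro c hc
  have hlit1 : ∀ c ∈ "...[truncated ".toList, 32 ≤ c.toNat ∧ c.toNat ≤ 126 := by
    intro c h
    simp at h
    rcases h with h|h|h|h|h|h|h|h|h|h|h|h <;> subst h <;> decide
  have hlit2 : ∀ c ∈ " chars]".toList, 32 ≤ c.toNat ∧ c.toNat ≤ 126 := by
    intro c h
    simp at h
    rcases h with h|h|h|h|h|h|h <;> subst h <;> decide
  rcases List.mem_append.mp hc with h1 | h1
  · rcases List.mem_append.mp h1 with h2 | h2
    · exact hlit1 c h2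
    · exact pv_toChars_printable d c h2
  · exact hlit2 c h1

-- no newline in a string ⇔ "\n" in s is False
theorem pv_isIn_newline_false (s : List Char) (h : '\n' ∉ s) :
    PySem.Chars.isIn ['\n'] s = false := by
  rw [PySem.Chars.isIn_eq_false_iff, List.singleton_infix_iff]
  exact h

-- the two programs agree for every prefix, docstring and limit
theorem pv_main (detail_prefix doc_raw : String) (limit : Int) :
    clipped_doc_lines detail_prefix doc_raw limit
      = clipped_doc_lines_alt detail_prefix doc_raw limit := by
  unfold clipped_doc_lines clipped_doc_lines_alt
  have hn := pv_newline_not_mem doc_raw.toList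
  set t := PySem.Chars.strip (PySem.Chars.replace doc_raw.toList ['\n'] [' ']) with ht
  by_cases h0 : t = []
  · simp [h0]
  · simp only [h0, if_false]
    by_cases hle : (t.length : Int) ≤ limit
    · have hclip : pvClip t limit = t := by simp [pvClip, hle]
      rw [hclip, pv_isIn_newline_false t hn]
      simp [hle, pvEscape]
    · set pre := PySem.Chars.slice t none (some limit) with hpre
      set tail := "...[truncated ".toList ++
        PySem.Int.toChars ((t.length : Int) - limit) ++ " chars]".toList with htail
      have hclip : pvClip t limit = pre ++ '\n' :: tail := by
        simp [pvClip, hle, hpre, htail]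
      have hmem : '\n' ∈ pvClip t limit := by
        rw [hclip]; exact List.mem_append.mpr (Or.inr (by simp))
      have hisin : PySem.Chars.isIn ['\n'] (pvClip t limit) = true := by
        rw [PySem.Chars.isIn_iff_infix, List.singleton_infix_iff]
        exact hmem
      have hprenl : '\n' ∉ pre := by
        rw [hpre, pv_slice_to_eq_take]
        exact fun h => hn (List.mem_of_mem_take h)
      have hsplit : PySem.Chars.splitMax? (pvClip t limit) ['\n'] 1 = some [pre, tail] := by
        rw [hclip]
        simp only [PySem.Chars.splitMax?, PySem.Chars.splitOnMax]
        rw [if_neg (by simp), if_neg (by omega)]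
        simp only [Int.toNat_one]
        rw [pv_splitOnMax_go_split tail pre ((pre ++ '\n' :: tail).length + 1) [] []
          hprenl (by simp)]
        simp
      have htaillines : PySem.Chars.splitlines tail = [tail] := by
        refine pv_splitlines_printable tail (by simp [htail]) ?_
        rw [htail]; exact pv_tail_printable _
      rw [hisin, hsplit]
      simp only [Bool.true_eq_false, if_false, htaillines, List.map_cons, List.map_nil]
      rw [if_neg hle]
      refine List.cons_eq_cons.mpr ⟨by simp [pvEscape], ?_⟩
      refine List.cons_eq_cons.mpr ⟨?_, rfl⟩
      congr 1
      rw [htail]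
      simp [List.cons_append, List.append_assoc]

-- ===== VERDICT (by name: the statement is the Claim_ definition above) =====
theorem clipped_doc_lines_spec : Claim_equal_clipped_doc_lines := by
  intro detail_prefix doc_raw limit _
  unfold Spec_clipped_doc_lines
  exact pv_main detail_prefix doc_raw limit
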